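-- pv_equiv track=rewrite | github.com/Payhon/fjbms | tools/bms_mqtt_gui/main_window.py | _contiguous_groups
-- ===== SOURCE A (Python) =====
-- def _contiguous_groups(addrs: list[int]) -> list[list[int]]:
--     if not addrs:
--         return []
--     groups: list[list[int]] = []
--     cur: list[int] = [addrs[0]]
--     for a in addrs[1:]:
--         if a == cur[-1] + 1:
--             cur.append(a)
--         else:
--             groups.append(cur)
--             cur = [a]
--     groups.append(cur)
--     return groups
-- ===== SOURCE B (Python) =====
-- def _contiguous_groups(addrs: list[int]) -> list[list[int]]:
--     out: list[list[int]] = []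
--     i, n = 0, len(addrs)
--     while i < n:
--         j = i + 1
--         while j < n and addrs[j] == addrs[j - 1] + 1:
--             j += 1
--         out.append(addrs[i:j])
--         i = j
--     return out
-- ===== Notes on version B (the rewrite author's own statement) =====
-- stated objective: alternative
-- what changed: Replaces A's incremental append/flush accumulator loop with a two-pointer scan that finds the end of each +1 run and emits the whole run as one slice.
import Mathlib
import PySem

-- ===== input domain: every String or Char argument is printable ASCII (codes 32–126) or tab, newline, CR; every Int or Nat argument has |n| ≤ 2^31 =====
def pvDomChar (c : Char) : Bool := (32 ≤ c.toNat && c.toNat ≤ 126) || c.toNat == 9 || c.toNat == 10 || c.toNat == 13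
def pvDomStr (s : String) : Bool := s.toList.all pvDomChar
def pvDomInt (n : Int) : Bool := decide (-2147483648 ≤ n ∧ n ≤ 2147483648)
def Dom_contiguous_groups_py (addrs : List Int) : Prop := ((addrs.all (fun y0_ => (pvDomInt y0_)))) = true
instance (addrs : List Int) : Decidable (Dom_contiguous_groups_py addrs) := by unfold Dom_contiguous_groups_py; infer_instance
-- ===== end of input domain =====

-- B replaces A's incremental append/flush accumulator loop with a two-pointer run scan that
-- emits each maximal +1 run as one slice (objective: alternative; same return value).

-- ===== PORT A =====
-- A: if empty return []; else fold over the tail maintaining (groups, cur), extending cur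
-- when a == cur[-1] + 1, otherwise flushing cur into groups; finally append cur.
def contiguous_groups_py (addrs : List Int) : List (List Int) :=
  match addrs with
  | [] => []
  | a0 :: rest =>
    let st := rest.foldl
      (fun (st : List (List Int) × List Int) a =>
        if a = st.2.getLast! + 1 then (st.1, st.2 ++ [a]) else (st.1 ++ [st.2], [a]))
      ([], [a0])
    st.1 ++ [st.2]

-- ===== PORT B =====
-- B's inner while loop: starting after an element `prev`, split off the longest +1 run
-- (the slice addrs[i:j] minus its first element) and return it with the remainder addrs[j:].
def cgRun (prev : Int) : List Int → List Int × List Int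
  | [] => ([], [])
  | a :: rest =>
    if a = prev + 1 then
      let (r, s) := cgRun a rest
      (a :: r, s)
    else ([], a :: rest)

theorem cgRun_snd_length (prev : Int) (l : List Int) : (cgRun prev l).2.length ≤ l.length := by
  induction l generalizing prev with
  | nil => simp [cgRun]
  | cons a rest ih =>
    simp only [cgRun]
    split
    · simpa using Nat.le_succ_of_le (ih a)
    · simp

-- B's outer while loop: emit one run slice, continue at the remainder.
def contiguous_groups_py_alt : List Int → List (List Int)
  | [] => []
  | a :: rest =>
    let p := cgRun a rest
    (a :: p.1) :: contiguous_groups_py_alt p.2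
termination_by l => l.length
decreasing_by
  simpa using Nat.lt_succ_of_le (cgRun_snd_length a rest)

-- ===== PRECONDITION & SPEC =====
def Spec_contiguous_groups_py (addrs : List Int) (out : List (List Int)) : Prop := out = contiguous_groups_py_alt addrs
instance (addrs : List Int) (out : List (List Int)) : Decidable (Spec_contiguous_groups_py addrs out) := by unfold Spec_contiguous_groups_py; infer_instance

-- ===== CLAIM (what is proved, stated in full; the proofs are below) =====
def Claim_equal_contiguous_groups_py : Prop := ∀ (addrs : List Int), Dom_contiguous_groups_py addrs → Spec_contiguous_groups_py addrs (contiguous_groups_py addrs)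

-- ===== LEMMAS AND PROOFS =====

theorem getLast!_concat_int (l : List Int) (a : Int) : (l ++ [a]).getLast! = a := by
  induction l with
  | nil => rfl
  | cons b t ih => simp [List.getLast!]

-- The invariant of A's fold: with pending group `cur` (whose last element is c) and
-- flushed groups `groups`, the final result equals `groups` followed by B's run
-- decomposition continued from c.
theorem fold_spec (l : List Int) :
    ∀ (groups : List (List Int)) (cur : List Int) (c : Int), cur.getLast! = c →
    (let st := l.foldl
        (fun (st : List (List Int) × List Int) a =>
          if a = st.2.getLast! + 1 then (st.1, st.2 ++ [a]) else (st.1 ++ [st.2], [a]))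
        (groups, cur)
     st.1 ++ [st.2]) =
    groups ++ ((cur ++ (cgRun c l).1) :: contiguous_groups_py_alt (cgRun c l).2) := by
  induction l with
  | nil =>
    intro groups cur c _
    simp [cgRun, contiguous_groups_py_alt]
  | cons a rest ih =>
    intro groups cur c hc
    by_cases h : a = c + 1
    · have hstep : (if a = cur.getLast! + 1 then (groups, cur ++ [a]) else (groups ++ [cur], [a]))
          = (groups, cur ++ [a]) := by rw [hc]; simp [h]
      simp only [List.foldl_cons, hstep]
      rw [ih groups (cur ++ [a]) a (getLast!_concat_int cur a)]
      simp only [cgRun, if_pos h]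
      simp
    · have hstep : (if a = cur.getLast! + 1 then (groups, cur ++ [a]) else (groups ++ [cur], [a]))
          = (groups ++ [cur], [a]) := by rw [hc]; simp [h]
      simp only [List.foldl_cons, hstep]
      rw [ih (groups ++ [cur]) [a] a rfl]
      simp only [cgRun, if_neg h]
      rw [contiguous_groups_py_alt]
      simp

-- ===== VERDICT (by name: the statement is the Claim_ definition above) =====
theorem contiguous_groups_py_spec : Claim_equal_contiguous_groups_py := by
  intro addrs _
  unfold Spec_contiguous_groups_py
  match addrs with
  | [] => simp [contiguous_groups_py, contiguous_groups_py_alt]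
  | a0 :: rest =>
    show (let st := rest.foldl _ ([], [a0]); st.1 ++ [st.2]) = _
    rw [fold_spec rest [] [a0] a0 rfl]
    rw [contiguous_groups_py_alt]
    simp
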